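-- pv_equiv track=rewrite | github.com/veoery/Vibe-Blender | src/vibe_blender/agents/editor.py | _map_trimmed_pos_to_orig
-- ===== SOURCE A (Python) =====
-- def _map_trimmed_pos_to_orig(
--     orig_code: str,
--     trimmed_code: str,
--     orig_line_starts: list[int],
--     trimmed_pos: int,
-- ) -> int:
--     """Convert a character position in trimmed_code to one in orig_code."""
--     # Which line does trimmed_pos fall on?
--     trimmed_lines = trimmed_code.split("\n")
--     offset = 0
--     for line_idx, line in enumerate(trimmed_lines):
--         line_end = offset + len(line)  # position just after this line's content
--         if trimmed_pos <= line_end: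
--             # It's within this line (or right at its end)
--             col = trimmed_pos - offset
--             return orig_line_starts[line_idx] + col
--         offset = line_end + 1  # +1 for \n
--
--     # Past the end — return length of original
--     return len(orig_code)
-- ===== SOURCE B (Python) =====
-- def _map_trimmed_pos_to_orig(
--     orig_code: str,
--     trimmed_code: str,
--     orig_line_starts: list[int],
--     trimmed_pos: int,
-- ) -> int:
--     """Convert a character position in trimmed_code to one in orig_code."""
--     if trimmed_pos > len(trimmed_code):
--         return len(orig_code)
--     # table of line-start offsets in trimmed_code
--     starts = [0] + [i + 1 for i, c in enumerate(trimmed_code) if c == "\n"]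
--     # binary search: first index whose start is > trimmed_pos (bisect_right)
--     lo, hi = 0, len(starts)
--     while lo < hi:
--         mid = (lo + hi) // 2
--         if starts[mid] <= trimmed_pos:
--             lo = mid + 1
--         else:
--             hi = mid
--     idx = lo - 1 if lo > 0 else 0  # clamp: negative positions map to line 0
--     return orig_line_starts[idx] + (trimmed_pos - starts[idx])
-- ===== Notes on version B (the rewrite author's own statement) =====
-- stated objective: alternative
-- what changed: B replaces A's per-line accumulating scan over split('\n') by a precomputed table of line-start offsets plus a bisect_right-style binary search, with an O(1) guard for positions past the end.
import Mathlib
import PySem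

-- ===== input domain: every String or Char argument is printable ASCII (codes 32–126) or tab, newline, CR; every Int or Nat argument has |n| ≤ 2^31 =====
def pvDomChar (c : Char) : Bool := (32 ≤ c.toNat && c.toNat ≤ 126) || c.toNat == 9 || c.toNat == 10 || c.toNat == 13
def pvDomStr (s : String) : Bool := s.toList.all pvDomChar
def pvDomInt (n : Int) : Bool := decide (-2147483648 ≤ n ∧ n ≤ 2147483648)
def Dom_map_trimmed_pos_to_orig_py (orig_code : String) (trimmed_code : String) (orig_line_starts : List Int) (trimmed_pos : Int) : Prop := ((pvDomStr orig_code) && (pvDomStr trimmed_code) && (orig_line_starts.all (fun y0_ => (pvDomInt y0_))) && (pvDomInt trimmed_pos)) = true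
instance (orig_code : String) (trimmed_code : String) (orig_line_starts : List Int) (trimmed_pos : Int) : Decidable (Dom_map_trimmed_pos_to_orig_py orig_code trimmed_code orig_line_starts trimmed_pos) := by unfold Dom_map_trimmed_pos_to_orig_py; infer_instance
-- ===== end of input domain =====

-- B replaces A's per-line accumulating scan by a table of line-start offsets plus a
-- hand-written bisect_right binary search (objective: alternative data structure; same
-- return value, no side effects in either version).

-- ===== PORT A =====
-- the for-loop over enumerate(trimmed_lines): early return = some, fall-through = none
def pvALoop (lines : List String) (orig_line_starts : List Int) (trimmed_pos : Int)
    (line_idx : Int) (offset : Int) : Option Int :=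
  match lines with
  | [] => none
  | line :: rest =>
    let line_end := offset + PySem.Str.len line
    if trimmed_pos ≤ line_end then
      some (PySem.List.pyGetD orig_line_starts line_idx 0 + (trimmed_pos - offset))
    else
      pvALoop rest orig_line_starts trimmed_pos (line_idx + 1) (line_end + 1)

def map_trimmed_pos_to_orig_py (orig_code : String) (trimmed_code : String) (orig_line_starts : List Int) (trimmed_pos : Int) : Int :=
  let trimmed_lines := (PySem.Str.split? trimmed_code "\n").getD []
  match pvALoop trimmed_lines orig_line_starts trimmed_pos 0 0 with
  | some r => r
  | none => PySem.Str.len orig_code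

-- ===== PORT B =====
-- the while-loop binary search (bisect_right) from Source B
def pvBsLoop (starts : List Int) (trimmed_pos : Int) (lo hi : Int) : Int :=
  if h : lo < hi then
    let mid := PySem.Int.floordiv (lo + hi) 2
    if PySem.List.pyGetD starts mid 0 ≤ trimmed_pos then
      pvBsLoop starts trimmed_pos (mid + 1) hi
    else
      pvBsLoop starts trimmed_pos lo mid
  else lo
termination_by (hi - lo).toNat
decreasing_by
  · have : lo ≤ PySem.Int.floordiv (lo + hi) 2 := by
      simp only [PySem.Int.floordiv, Int.fdiv_eq_ediv]; omega
    omega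
  · have : PySem.Int.floordiv (lo + hi) 2 < hi := by
      simp only [PySem.Int.floordiv, Int.fdiv_eq_ediv]; omega
    omega

def map_trimmed_pos_to_orig_py_alt (orig_code : String) (trimmed_code : String) (orig_line_starts : List Int) (trimmed_pos : Int) : Int :=
  if trimmed_pos > PySem.Str.len trimmed_code then PySem.Str.len orig_code
  else
    let starts : List Int :=
      0 :: (PySem.List.enumerate trimmed_code.toList).filterMap
        (fun ic => if ic.2 = '\n' then some (ic.1 + 1) else none)
    let lo := pvBsLoop starts trimmed_pos 0 (starts.length : Int)
    let idx := if 0 < lo then lo - 1 else 0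
    PySem.List.pyGetD orig_line_starts idx 0 + (trimmed_pos - PySem.List.pyGetD starts idx 0)

-- ===== PRECONDITION & SPEC =====
-- Pre_ excludes exactly the inputs where Python A raises IndexError: trimmed_pos lands on
-- line k of trimmed_code (k = newlines before the position) but orig_line_starts has no entry k.
def Pre_map_trimmed_pos_to_orig_py (orig_code : String) (trimmed_code : String) (orig_line_starts : List Int) (trimmed_pos : Int) : Prop :=
  PySem.Str.len trimmed_code < trimmed_pos ∨
    (trimmed_code.toList.take trimmed_pos.toNat).count '\n' < orig_line_starts.length
instance (orig_code : String) (trimmed_code : String) (orig_line_starts : List Int) (trimmed_pos : Int) : Decidable (Pre_map_trimmed_pos_to_orig_py orig_code trimmed_code orig_line_starts trimmed_pos) := by unfold Pre_map_trimmed_pos_to_orig_py; infer_instance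

def pvWitness_map_trimmed_pos_to_orig_py : String × String × List Int × Int := ("ab\ncd", "a\nc", [0, 3], 2)

def Spec_map_trimmed_pos_to_orig_py (orig_code : String) (trimmed_code : String) (orig_line_starts : List Int) (trimmed_pos : Int) (out : Int) : Prop := out = map_trimmed_pos_to_orig_py_alt orig_code trimmed_code orig_line_starts trimmed_pos
instance (orig_code : String) (trimmed_code : String) (orig_line_starts : List Int) (trimmed_pos : Int) (out : Int) : Decidable (Spec_map_trimmed_pos_to_orig_py orig_code trimmed_code orig_line_starts trimmed_pos out) := by unfold Spec_map_trimmed_pos_to_orig_py; infer_instance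

-- ===== CLAIM (what is proved, stated in full; the proofs are below) =====
def Claim_equal_map_trimmed_pos_to_orig_py : Prop := ∀ (orig_code : String) (trimmed_code : String) (orig_line_starts : List Int) (trimmed_pos : Int), Dom_map_trimmed_pos_to_orig_py orig_code trimmed_code orig_line_starts trimmed_pos → Pre_map_trimmed_pos_to_orig_py orig_code trimmed_code orig_line_starts trimmed_pos → Spec_map_trimmed_pos_to_orig_py orig_code trimmed_code orig_line_starts trimmed_pos (map_trimmed_pos_to_orig_py orig_code trimmed_code orig_line_starts trimmed_pos)

-- ===== LEMMAS AND PROOFS =====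

-- reference split on '\n' with an explicit current-line accumulator
def pvSplit (pre : List Char) : List Char → List (List Char)
  | [] => [pre]
  | c :: rest => if c = '\n' then pre :: pvSplit [] rest else pvSplit (pre ++ [c]) rest

theorem pvSplitOn_go_eq (fuel : Nat) : ∀ (l cur : List Char) (acc : List (List Char)),
    l.length < fuel →
    PySem.Chars.splitOn.go ['\n'] fuel l cur acc = acc.reverse ++ pvSplit cur.reverse l := by
  induction fuel with
  | zero => intro l cur acc h; omega
  | succ n ih =>
    intro l cur acc h
    match l with
    | [] => simp [PySem.Chars.splitOn.go, pvSplit]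
    | c :: rest =>
      rw [PySem.Chars.splitOn.go]
      by_cases hc : c = '\n'
      · subst hc
        rw [if_pos (by simp [List.isPrefixOf])]
        have hd : List.drop ['\n'].length ('\n' :: rest) = rest := rfl
        rw [hd, ih rest [] (cur.reverse :: acc) (by simp at h ⊢; omega)]
        simp [pvSplit]
      · rw [if_neg (by simp [List.isPrefixOf]; exact fun hh => (hc hh.symm).elim)]
        rw [ih rest (c :: cur) acc (by simp at h ⊢; omega)]
        simp [pvSplit, hc]

theorem pvSplitOn_eq (s : List Char) : PySem.Chars.splitOn s ['\n'] = pvSplit [] s := by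
  have := pvSplitOn_go_eq (s.length + 1) s [] [] (by omega)
  simpa [PySem.Chars.splitOn] using this

-- line-start offsets of a list of lines laid out from a base offset
def pvLineStarts (off : Int) : List (List Char) → List Int
  | [] => []
  | l :: rest => off :: pvLineStarts (off + l.length + 1) rest

theorem pvStarts_eq (s : List Char) (pre : List Char) (k : Int) :
    pvLineStarts (k - pre.length) (pvSplit pre s) =
      (k - pre.length) :: (PySem.List.enumerate s k).filterMap
        (fun ic => if ic.2 = '\n' then some (ic.1 + 1) else none) := by
  induction s generalizing pre k with
  | nil => simp [pvSplit, pvLineStarts, PySem.List.enumerate]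
  | cons c rest ih =>
    simp only [pvSplit]
    by_cases hc : c = '\n'
    · subst hc
      have hsp : (if ('\n' : Char) = '\n' then pre :: pvSplit [] rest
          else pvSplit (pre ++ ['\n']) rest) = pre :: pvSplit [] rest := if_pos rfl
      rw [hsp]
      simp only [pvLineStarts, PySem.List.enumerate]
      have h1 : k - (pre.length : Int) + pre.length + 1 = (k + 1) - (([] : List Char).length : Int) := by
        simp
      rw [h1, ih [] (k + 1)]
      simp
    · simp only [if_neg hc, PySem.List.enumerate]
      have h1 : k - (pre.length : Int) = (k + 1) - ((pre ++ [c]).length : Int) := by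
        simp only [List.length_append, List.length_cons, List.length_nil]
        push_cast
        ring
      rw [h1, ih (pre ++ [c]) (k + 1)]
      simp [hc]

-- the char-level version of A's loop
def pvCLoop (lines : List (List Char)) (ls : List Int) (tp : Int) (idx : Int) (off : Int) : Option Int :=
  match lines with
  | [] => none
  | line :: rest =>
    let line_end := off + (line.length : Int)
    if tp ≤ line_end then some (PySem.List.pyGetD ls idx 0 + (tp - off))
    else pvCLoop rest ls tp (idx + 1) (line_end + 1)

theorem pvALoop_eq_cLoop (L : List (List Char)) (ls : List Int) (tp idx off : Int) :
    pvALoop (L.map String.ofList) ls tp idx off = pvCLoop L ls tp idx off := by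
  induction L generalizing idx off with
  | nil => rfl
  | cons l rest ih => simp [pvALoop, pvCLoop, PySem.Str.len, ih]

-- content length of a list of lines (joined with '\n')
def pvCLen : List (List Char) → Int
  | [] => 0
  | [l] => l.length
  | l :: rest => l.length + 1 + pvCLen rest

theorem pvSplit_ne_nil (s pre : List Char) : pvSplit pre s ≠ [] := by
  induction s generalizing pre with
  | nil => simp [pvSplit]
  | cons c rest ih =>
    simp only [pvSplit]
    by_cases hc : c = '\n'
    · simp [hc]
    · simpa [hc] using ih (pre ++ [c])

theorem pvCLen_cons (l : List Char) (L : List (List Char)) (h : L ≠ []) :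
    pvCLen (l :: L) = l.length + 1 + pvCLen L := by
  cases L with
  | nil => exact absurd rfl h
  | cons a b => rfl

theorem pvCLen_split (s pre : List Char) : pvCLen (pvSplit pre s) = pre.length + s.length := by
  induction s generalizing pre with
  | nil => simp [pvSplit, pvCLen]
  | cons c rest ih =>
    simp only [pvSplit]
    by_cases hc : c = '\n'
    · rw [if_pos hc, pvCLen_cons _ _ (pvSplit_ne_nil rest []), ih []]
      simp; ring
    · rw [if_neg hc, ih (pre ++ [c])]
      simp; ring

theorem pvCLen_nonneg (L : List (List Char)) : 0 ≤ pvCLen L := by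
  induction L with
  | nil => simp [pvCLen]
  | cons l rest ih =>
    cases rest with
    | nil =>
      show (0 : Int) ≤ (l.length : Int)
      exact Int.natCast_nonneg _
    | cons a b =>
      rw [pvCLen_cons _ _ (by simp)]
      have : (0 : Int) ≤ (l.length : Int) := Int.natCast_nonneg _
      omega

theorem pvLineStarts_ge (off : Int) (L : List (List Char)) :
    ∀ x ∈ pvLineStarts off L, off ≤ x := by
  induction L generalizing off with
  | nil => simp [pvLineStarts]
  | cons l rest ih =>
    intro x hx
    simp only [pvLineStarts, List.mem_cons] at hx
    rcases hx with rfl | hx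
    · exact le_refl _
    · have := ih (off + l.length + 1) x hx
      have hl : (0 : Int) ≤ l.length := Int.natCast_nonneg _
      omega

theorem pvLineStarts_pairwise (off : Int) (L : List (List Char)) :
    (pvLineStarts off L).Pairwise (· ≤ ·) := by
  induction L generalizing off with
  | nil => simp [pvLineStarts]
  | cons l rest ih =>
    simp only [pvLineStarts]
    refine List.Pairwise.cons (fun x hx => ?_) (ih _)
    have := pvLineStarts_ge (off + l.length + 1) rest x hx
    have hl : (0 : Int) ≤ l.length := Int.natCast_nonneg _
    omega

-- the index B selects: bisect_right minus one, clamped at 0 (Nat subtraction clamps)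
def pvKOf (S : List Int) (tp : Int) : Nat := S.countP (fun a => decide (a ≤ tp)) - 1

-- A's loop returns the entry selected by the countP characterisation
theorem pvCLoop_char (L : List (List Char)) (ls : List Int) (tp idx off : Int)
    (hne : L ≠ []) (hle : tp ≤ off + pvCLen L) :
    pvCLoop L ls tp idx off =
      some (PySem.List.pyGetD ls (idx + (pvKOf (pvLineStarts off L) tp : Int)) 0 +
        (tp - (pvLineStarts off L).getD (pvKOf (pvLineStarts off L) tp) 0)) := by
  induction L generalizing idx off with
  | nil => exact absurd rfl hne
  | cons l rest ih =>
    by_cases htp : tp ≤ off + (l.length : Int)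
    · -- found in the first line
      have hz : (pvLineStarts (off + l.length + 1) rest).countP (fun a => decide (a ≤ tp)) = 0 := by
        rw [List.countP_eq_zero]
        intro x hx
        have := pvLineStarts_ge _ _ x hx
        simp only [decide_eq_true_eq]
        omega
      have hk : pvKOf (pvLineStarts off (l :: rest)) tp = 0 := by
        simp only [pvKOf, pvLineStarts, List.countP_cons, hz]
        split_ifs <;> simp
      have hk' : pvKOf (off :: pvLineStarts (off + l.length + 1) rest) tp = 0 := by
        simpa [pvLineStarts] using hk
      simp only [pvCLoop, if_pos htp, pvLineStarts, hk']
      simp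
    · -- recurse into the rest
      have hoff : off + (l.length : Int) + 1 ≤ tp := by omega
      have hrne : rest ≠ [] := by
        intro hr; subst hr
        simp only [pvCLen] at hle
        omega
      have hle' : tp ≤ (off + l.length + 1) + pvCLen rest := by
        rw [pvCLen_cons _ _ hrne] at hle; omega
      rw [pvCLoop, if_neg htp, ih (idx + 1) (off + l.length + 1) hrne hle']
      -- relate the countP over the full starts list to the one over the tail
      obtain ⟨r, rs, hr⟩ := List.exists_cons_of_ne_nil hrne
      have hpos : 1 ≤ (pvLineStarts (off + l.length + 1) rest).countP (fun a => decide (a ≤ tp)) := by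
        subst hr
        simp only [pvLineStarts, List.countP_cons, decide_eq_true_eq]
        rw [if_pos (by omega)]
        omega
      set c := (pvLineStarts (off + l.length + 1) rest).countP (fun a => decide (a ≤ tp)) with hc
      have hkS : pvKOf (pvLineStarts off (l :: rest)) tp = c := by
        simp only [pvKOf, pvLineStarts, List.countP_cons, decide_eq_true_eq, ← hc]
        rw [if_pos (by omega)]
        omega
      have hk' : pvKOf (pvLineStarts (off + l.length + 1) rest) tp = c - 1 := rfl
      rw [hkS, hk']
      obtain ⟨m, hm⟩ : ∃ m, c = m + 1 := ⟨c - 1, by omega⟩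
      simp only [pvLineStarts, hm]
      simp only [List.getD_cons_succ]
      congr 2
      · congr 1
        push_cast
        omega

theorem pvCLoop_none (L : List (List Char)) (ls : List Int) (tp idx off : Int)
    (h : off + pvCLen L < tp) : pvCLoop L ls tp idx off = none := by
  induction L generalizing idx off with
  | nil => rfl
  | cons l rest ih =>
    by_cases hrne : rest = []
    · subst hrne
      simp only [pvCLen] at h
      rw [pvCLoop, if_neg (by omega : ¬ tp ≤ off + (l.length : Int))]
      rfl
    · have h0 : 0 ≤ pvCLen rest := pvCLen_nonneg rest
      rw [pvCLen_cons _ _ hrne] at h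
      rw [pvCLoop, if_neg (by omega : ¬ tp ≤ off + (l.length : Int))]
      exact ih _ _ (by omega)

-- countP of a sorted list equals any cut point lo with all-below ≤ and all-above >
theorem pvCountP_cut (S : List Int) (tp : Int) (lo : Nat) (hlo : lo ≤ S.length)
    (hbelow : ∀ j (h : j < S.length), j < lo → S[j] ≤ tp)
    (habove : ∀ j (h : j < S.length), lo ≤ j → tp < S[j]) :
    S.countP (fun a => decide (a ≤ tp)) = lo := by
  induction S generalizing lo with
  | nil =>
    simp only [List.countP_nil]
    simp at hlo
    omega
  | cons a S' ih =>
    cases lo with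
    | zero =>
      have ha := habove 0 (by simp) (Nat.zero_le _)
      simp only [List.getElem_cons_zero] at ha
      have hpa : decide (a ≤ tp) = false := by
        simp only [decide_eq_false_iff_not]
        omega
      rw [List.countP_cons, hpa]
      simp only [Bool.false_eq_true, if_false, Nat.add_zero]
      exact ih 0 (Nat.zero_le _) (fun j hj h => absurd h (Nat.not_lt_zero _))
        (fun j hj _ => by simpa using habove (j + 1) (by simpa using hj) (Nat.zero_le _))
    | succ m =>
      have hb := hbelow 0 (by simp) (Nat.succ_pos _)
      simp only [List.getElem_cons_zero] at hb
      have hpa : decide (a ≤ tp) = true := by simpa using hb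
      rw [List.countP_cons, hpa]
      simp only [if_true]
      rw [ih m (by simpa using hlo)
        (fun j hj hjm => by simpa using hbelow (j + 1) (by simpa using hj) (by omega))
        (fun j hj hmj => by simpa using habove (j + 1) (by simpa using hj) (by omega))]

-- the binary search computes bisect_right = countP on a sorted list
theorem pvBsLoop_inv (S : List Int) (tp : Int) (hs : S.Pairwise (· ≤ ·)) (n : Nat) :
    ∀ (lo hi : Int), (hi - lo).toNat = n → 0 ≤ lo → lo ≤ hi → hi ≤ (S.length : Int) →
    (∀ j (h : j < S.length), (j : Int) < lo → S[j] ≤ tp) →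
    (∀ j (h : j < S.length), hi ≤ (j : Int) → tp < S[j]) →
    pvBsLoop S tp lo hi = (S.countP (fun a => decide (a ≤ tp)) : Int) := by
  have hsort : ∀ i j (hi : i < S.length) (hj : j < S.length), i < j → S[i] ≤ S[j] := by
    intro i j hi hj hij
    exact List.pairwise_iff_getElem.mp hs i j hi hj hij
  induction n using Nat.strong_induction_on with
  | _ n ihn =>
    intro lo hi hn h0 hlh hhl hbelow habove
    rw [pvBsLoop]
    by_cases hlt : lo < hi
    · rw [dif_pos hlt]
      have hfd : PySem.Int.floordiv (lo + hi) 2 = (lo + hi) / 2 :=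
        Int.fdiv_eq_ediv_of_nonneg (lo + hi) (by norm_num : (0 : Int) ≤ 2)
      have hmid : lo ≤ PySem.Int.floordiv (lo + hi) 2 ∧ PySem.Int.floordiv (lo + hi) 2 < hi := by
        rw [hfd]
        omega
      set mid := PySem.Int.floordiv (lo + hi) 2 with hmd
      have hmlen : mid.toNat < S.length := by omega
      have hget : PySem.List.pyGetD S mid 0 = S[mid.toNat] :=
        PySem.List.pyGetD_eq_getElem S 0 (by omega) (by omega)
      by_cases hcmp : PySem.List.pyGetD S mid 0 ≤ tp
      · rw [if_pos hcmp]
        refine ihn (hi - (mid + 1)).toNat (by omega) (mid + 1) hi (by omega) (by omega)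
          (by omega) hhl ?_ habove
        intro j hj hjm
        by_cases hje : j = mid.toNat
        · subst hje; rw [← hget]; exact hcmp
        · have : S[j] ≤ S[mid.toNat] := hsort j mid.toNat hj hmlen (by omega)
          rw [hget] at hcmp
          omega
      · rw [if_neg hcmp]
        rw [hget] at hcmp
        refine ihn (mid - lo).toNat (by omega) lo mid (by omega) h0 (by omega) (by omega)
          hbelow ?_
        intro j hj hmj
        by_cases hje : j = mid.toNat
        · subst hje; omega
        · have : S[mid.toNat] ≤ S[j] := hsort mid.toNat j hmlen hj (by omega)
          omega
    · rw [dif_neg hlt]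
      have hle : lo = hi := by omega
      have := pvCountP_cut S tp lo.toNat (by omega)
        (fun j hj hjl => hbelow j hj (by omega))
        (fun j hj hlj => habove j hj (by omega))
      rw [this]
      omega

theorem pvBsLoop_eq (S : List Int) (tp : Int) (hs : S.Pairwise (· ≤ ·)) :
    pvBsLoop S tp 0 (S.length : Int) = (S.countP (fun a => decide (a ≤ tp)) : Int) := by
  refine pvBsLoop_inv S tp hs _ 0 (S.length : Int) rfl (by omega) (by omega) (by omega)
    (fun j hj hj0 => by omega) (fun j hj hlj => by omega)

-- ===== VERDICT (by name: the statement is the Claim_ definition above) =====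
theorem pvStarts_eq' (s : List Char) :
    pvLineStarts 0 (pvSplit [] s) =
      0 :: (PySem.List.enumerate s 0).filterMap
        (fun ic => if ic.2 = '\n' then some (ic.1 + 1) else none) := by
  have := pvStarts_eq s [] 0
  simpa using this

theorem pvSplitStr (trimmed_code : String) :
    (PySem.Str.split? trimmed_code "\n").getD [] = (pvSplit [] trimmed_code.toList).map String.ofList := by
  simp [PySem.Str.split?, PySem.Chars.split?, pvSplitOn_eq]

-- ===== VERDICT (by name: the statement is the Claim_ definition above) =====
theorem map_trimmed_pos_to_orig_py_spec : Claim_equal_map_trimmed_pos_to_orig_py := by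
  intro orig_code trimmed_code orig_line_starts trimmed_pos _hdom _hpre
  unfold Spec_map_trimmed_pos_to_orig_py
  simp only [map_trimmed_pos_to_orig_py, map_trimmed_pos_to_orig_py_alt, pvSplitStr,
    pvALoop_eq_cLoop]
  set s := trimmed_code.toList with hsdef
  have hlen : PySem.Str.len trimmed_code = (s.length : Int) := by
    simp [PySem.Str.len, hsdef]
  by_cases hpast : trimmed_pos > PySem.Str.len trimmed_code
  · rw [pvCLoop_none _ _ _ _ _ (by rw [pvCLen_split]; simp; omega)]
    rw [if_pos hpast]
  · rw [if_neg hpast]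
    rw [pvCLoop_char _ _ _ _ _ (pvSplit_ne_nil s []) (by rw [pvCLen_split]; simp; omega)]
    rw [← pvStarts_eq']
    set S := pvLineStarts 0 (pvSplit [] s) with hS
    rw [pvBsLoop_eq S trimmed_pos (hS ▸ pvLineStarts_pairwise 0 _)]
    set c := S.countP (fun a => decide (a ≤ trimmed_pos)) with hc
    have hidx : (if 0 < (c : Int) then (c : Int) - 1 else 0) = ((pvKOf S trimmed_pos : Nat) : Int) := by
      simp only [pvKOf, ← hc]
      split_ifs with h0 <;> push_cast <;> omega
    rw [hidx]
    have hgd : PySem.List.pyGetD S ((pvKOf S trimmed_pos : Nat) : Int) 0 =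
        S.getD (pvKOf S trimmed_pos) 0 := PySem.List.pyGetD_natCast S _ 0
    rw [hgd]
    simp
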